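-- pv_equiv track=rewrite | github.com/jystella17/Algorithm | Deque/행렬과 연산.py | solution
-- ===== SOURCE A (Python) =====
-- from collections import deque
--
-- def solution(rc, operations):
--     answer = []
--     n = len(rc)
--     # 제일 왼쪽/제일 오른쪽 column에 해당하는 값은 left_col, right_col에서 저장하므로
--     # 같은 데이터를 중복 저장하지 않고 left_col, right_col에 없는 데이터만 rows에 저장
--     # ex. rc[0] = [1, 2, 3]이라면,
--     # 1과 3은 left_col, right_col에 저장되므로 2만 rows에 저장
--     rows = deque(deque(row[1:-1]) for row in rc)
--     left_col = deque(row[0] for row in rc)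
--     right_col = deque(row[len(rc[0])-1] for row in rc)
--
--     for op in operations:
--         if op == "ShiftRow":
--             # left_col, rows, right_col에서 마지막 원소 (= 마지막 행) pop
--             # -> 각각 첫 번째 원소로 append (= 첫번째 행)
--             left_col.appendleft(left_col.pop())
--             rows.appendleft(rows.pop())
--             right_col.appendleft(right_col.pop())
--
--         else: # Rotate
--             # 4개의 모서리에 대한 처리 (예시는 3X3 행렬으로 가정)
--             # (1,1)에 위치한 숫자 -> (1,2)로 이동
--             rows[0].appendleft(left_col.popleft())
--             # (1,2)에 위치한 숫자 -> (1,3)로 이동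
--             right_col.appendleft(rows[0].pop())
--             # (3,3)에 위치한 숫자 -> (3,2)로 이동
--             rows[n-1].append(right_col.pop())
--             # (3,2)에 위치한 숫자 -> (3,1)로 이동
--             left_col.append(rows[n-1].popleft())
--
--     for i in range(n):
--         answer.append([left_col[i]]+ list(rows[i]) + [right_col[i]])
--
--     return answer
-- ===== SOURCE B (Python) =====
-- def solution(rc, operations):
--     mat = [list(row) for row in rc]
--     for op in operations:
--         if op == "ShiftRow":
--             # cyclic shift of whole rows: last row to the top
--             mat = [mat[-1]] + mat[:-1]
--         else:  # Rotate: outer border one step clockwise, interior untouched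
--             new_top = [mat[1][0]] + mat[0][:-1]
--             new_body = [[nxt[0]] + cur[1:-1] + [prv[-1]]
--                         for prv, cur, nxt in zip(mat, mat[1:-1], mat[2:])]
--             new_last = mat[-1][1:] + [mat[-2][-1]]
--             mat = [new_top] + new_body + [new_last]
--     return mat
-- ===== Notes on version B (the rewrite author's own statement) =====
-- stated objective: simpler
-- what changed: B drops A's three-deque decomposition (left column / trimmed middle rows / right column, reassembled at the end) and keeps the plain matrix, rebuilding the shifted row order or the clockwise-rotated border rows directly on each operation.
-- outside the precondition, e.g. on solution([[5]], []): A returns [[5, 5]], B returns [[5]]; on solution([[7], [8]], ['Rotate']): A returns [[8, 7], [8, 7]], B returns [[8], [7]]; on solution([[1, 2, 3]], ['Rotate']): A returns [[1, 3, 2]], B raises IndexError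
import Mathlib
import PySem

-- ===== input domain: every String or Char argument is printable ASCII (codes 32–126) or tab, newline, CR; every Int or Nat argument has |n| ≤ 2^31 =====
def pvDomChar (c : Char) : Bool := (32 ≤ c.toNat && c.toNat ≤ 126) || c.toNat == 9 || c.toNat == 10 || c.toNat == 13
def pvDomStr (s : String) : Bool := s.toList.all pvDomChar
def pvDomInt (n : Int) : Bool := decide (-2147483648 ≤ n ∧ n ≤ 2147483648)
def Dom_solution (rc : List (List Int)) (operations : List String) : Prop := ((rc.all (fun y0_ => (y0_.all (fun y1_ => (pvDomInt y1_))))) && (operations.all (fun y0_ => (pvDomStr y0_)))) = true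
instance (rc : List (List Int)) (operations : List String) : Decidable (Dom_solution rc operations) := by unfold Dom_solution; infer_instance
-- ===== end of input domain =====

-- B replaces A's three-deque bookkeeping (left column / trimmed middle rows / right column) by the
-- plain matrix, rebuilding the shifted rows or the clockwise-rotated border directly per operation.

-- ===== PORT A =====
-- one loop step of A; the deques are Lists (appendleft = cons, pop = last, popleft = head);
-- head/last/index reads use defaults, exact where the deques are nonempty / index in range (holds under Pre_)
def solutionStepA (n : Nat) (st : List Int × List (List Int) × List Int) (op : String) :
    List Int × List (List Int) × List Int :=
  let left := st.1; let rows := st.2.1; let right := st.2.2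
  if op == "ShiftRow" then
    (left.getLastD 0 :: left.dropLast, rows.getLastD [] :: rows.dropLast,
     right.getLastD 0 :: right.dropLast)
  else
    let x := left.headD 0
    let left := left.tail
    let rows := rows.set 0 (x :: rows.getD 0 [])
    let y := (rows.getD 0 []).getLastD 0
    let rows := rows.set 0 (rows.getD 0 []).dropLast
    let right := y :: right
    let z := right.getLastD 0
    let right := right.dropLast
    let rows := rows.set (n-1) ((rows.getD (n-1) []) ++ [z])
    let w := (rows.getD (n-1) []).headD 0
    let rows := rows.set (n-1) ((rows.getD (n-1) []).tail)
    let left := left ++ [w]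
    (left, rows, right)
def solution (rc : List (List Int)) (operations : List String) : List (List Int) :=
  let n := rc.length
  let rows := rc.map (fun row => PySem.List.slice row (some 1) (some (-1)))
  let left := rc.map (fun row => row.headD 0)
  let right := rc.map (fun row => row.getD ((rc.headD []).length - 1) 0)
  let st := operations.foldl (solutionStepA n) (left, rows, right)
  (List.range n).map (fun i => st.1.getD i 0 :: st.2.1.getD i [] ++ [st.2.2.getD i 0])
-- ===== PORT B =====
-- one loop step of B (from Source B); head/last reads use defaults, exact where the matrix has ≥ 2 rows (holds under Pre_)
def solutionStepB (mat : List (List Int)) (op : String) : List (List Int) :=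
  if op == "ShiftRow" then
    mat.getLastD [] :: mat.dropLast
  else
    let newTop := (mat.tail.headD []).headD 0 :: (mat.headD []).dropLast
    let newBody := (mat.zip (mat.tail.dropLast |>.zip mat.tail.tail)).map
        (fun pcn => (pcn.2.2).headD 0 :: (pcn.2.1).tail.dropLast ++ [(pcn.1).getLastD 0])
    let newLast := (mat.getLastD []).tail ++ [(mat.dropLast.getLastD []).getLastD 0]
    newTop :: newBody ++ [newLast]
def solution_alt (rc : List (List Int)) (operations : List String) : List (List Int) :=
  operations.foldl solutionStepB (rc.map (fun row => row.map id))

-- ===== PRECONDITION & SPEC =====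
-- Pre_ restricts to the task's natural domain: rectangular matrices with at least 2 rows and 2
-- columns; outside it (a single row or column, or ragged rows) A still returns, but its values
-- are accidents of the deque bookkeeping (cells duplicated or reordered) that no specification
-- would ask for, and B's natural border rotation does not reproduce them.
def Pre_solution (rc : List (List Int)) (operations : List String) : Prop :=
  2 ≤ rc.length ∧ 2 ≤ (rc.headD []).length ∧ ∀ r ∈ rc, r.length = (rc.headD []).length

instance (rc : List (List Int)) (operations : List String) : Decidable (Pre_solution rc operations) := by
  unfold Pre_solution; infer_instance

def pvWitness_solution : List (List Int) × List String :=
  ([[1, 2, 3], [4, 5, 6], [7, 8, 9]], ["ShiftRow", "Rotate"])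

def Spec_solution (rc : List (List Int)) (operations : List String) (out : List (List Int)) : Prop := out = solution_alt rc operations
instance (rc : List (List Int)) (operations : List String) (out : List (List Int)) : Decidable (Spec_solution rc operations out) := by unfold Spec_solution; infer_instance

-- ===== CLAIM (what is proved, stated in full; the proofs are below) =====
def Claim_equal_solution : Prop := ∀ (rc : List (List Int)) (operations : List String), Dom_solution rc operations → Pre_solution rc operations → Spec_solution rc operations (solution rc operations)

-- ===== LEMMAS AND PROOFS =====

-- abstraction: A's three deques are the heads, trimmed middles and lasts of B's matrix rows
def encL (mat : List (List Int)) : List Int := mat.map (fun r => r.headD 0)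
def encM (mat : List (List Int)) : List (List Int) := mat.map (fun r => r.tail.dropLast)
def encR (mat : List (List Int)) : List Int := mat.map (fun r => r.getLastD 0)

-- helper lemmas
theorem set_map_concat {α β : Type} (f : α → β) (l : List α) (a b : β) :
    (l.map f ++ [a]).set l.length b = l.map f ++ [b] := by
  induction l with
  | nil => rfl
  | cons x l ih => simp [ih]

theorem getD_map_concat {α β : Type} (f : α → β) (l : List α) (a d : β) :
    (l.map f ++ [a]).getD l.length d = a := by
  induction l with
  | nil => rfl
  | cons x l ih => simpa using ih

theorem headD_append_left {α : Type} (l l' : List α) (d : α) (h : l ≠ []) :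
    (l ++ l').headD d = l.headD d := by
  cases l with | nil => exact absurd rfl h | cons a t => rfl

theorem getLastD_irrel {α : Type} : ∀ (t : List α) (a : α) (d d' : α),
    (a :: t).getLastD d = (a :: t).getLastD d'
  | [], a, d, d' => rfl
  | b :: u, a, d, d' => by
      simpa [List.getLastD] using getLastD_irrel u b d d'

theorem tail_append_singleton {α : Type} (l : List α) (a : α) (h : l ≠ []) :
    (l ++ [a]).tail = l.tail ++ [a] := by
  cases l with | nil => exact absurd rfl h | cons x t => rfl

theorem dropLast_concat_getLastD {α : Type} :
    ∀ (l : List α) (d : α), l ≠ [] → l.dropLast ++ [l.getLastD d] = l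
  | [a], d, _ => rfl
  | a :: b :: u, d, _ => by
      simpa using dropLast_concat_getLastD (b :: u) a (by simp)

theorem row_hd_dropLast (r : List Int) (h : 2 ≤ r.length) :
    r.headD 0 :: r.tail.dropLast = r.dropLast := by
  cases r with
  | nil => simp at h
  | cons a t => cases t with | nil => simp at h | cons b u => rfl

theorem row_tail_recon (r : List Int) (h : 2 ≤ r.length) :
    r.tail.dropLast ++ [r.getLastD 0] = r.tail := by
  cases r with
  | nil => simp at h
  | cons a t =>
    cases t with
    | nil => simp at h
    | cons b u =>
      have h2 := dropLast_concat_getLastD (b :: u) 0 (by simp)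
      simpa using h2

theorem map_dropLast_concat {α : Type} (g : List α → α) (v : List (List α)) (d : List α) (h : v ≠ []) :
    v.dropLast.map g ++ [g (v.getLastD d)] = v.map g := by
  conv_rhs => rw [← dropLast_concat_getLastD v d h]
  simp

-- zip shape of B's body comprehension: (r0 :: u) ζipped with u.dropLast and u.tail
theorem zipE_map3 {β : Type} (f : List Int → β) :
    ∀ (u : List (List Int)) (r0 : List Int),
      (((r0 :: u).zip (u.dropLast.zip u.tail)).map fun x => f x.2.2) = u.tail.map f
  | [], _ => rfl
  | [_], _ => rfl
  | a :: b :: u', r0 => by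
      simpa using zipE_map3 f (b :: u') a

theorem zipE_map2 {β : Type} (f : List Int → β) :
    ∀ (u : List (List Int)) (r0 : List Int),
      (((r0 :: u).zip (u.dropLast.zip u.tail)).map fun x => f x.2.1) = u.dropLast.map f
  | [], _ => rfl
  | [_], _ => rfl
  | a :: b :: u', r0 => by
      simpa using zipE_map2 f (b :: u') a

theorem zipE_map1 {β : Type} (f : List Int → β) :
    ∀ (u : List (List Int)) (r0 : List Int),
      (((r0 :: u).zip (u.dropLast.zip u.tail)).map fun x => f x.1)
        = ((r0 :: u).dropLast.dropLast).map f
  | [], _ => rfl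
  | [_], _ => rfl
  | a :: b :: u', r0 => by
      have ih := zipE_map1 f (b :: u') a
      simp at ih ⊢
      rw [ih]

theorem map_getLast' {β : Type} (f : List Int → β) (b : β) (d : List Int) :
    ∀ (u : List (List Int)) (a : List Int),
      (f a :: u.map f).getLast?.getD b = f ((a :: u).getLast?.getD d)
  | [], _ => rfl
  | c :: u', a => by simpa using map_getLast' f b d u' c

theorem map_getLastD (f : List Int → Int) (d : List Int) :
    ∀ (t : List (List Int)) (a : List Int), ((a :: t).map f).getLastD 0 = f ((a :: t).getLastD d)
  | [], a => rfl
  | b :: u, a => by simpa [List.getLastD] using map_getLastD f d u b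

theorem map_eq_headD_cons (f : List Int → Int) (d : List Int) (u : List (List Int)) (h : u ≠ []) :
    u.map f = f (u.headD d) :: u.tail.map f := by
  cases u with | nil => exact absurd rfl h | cons a t => rfl
theorem getLastD_cons_concat {α : Type} :
    ∀ (l : List α) (b c d : α), (b :: (l ++ [c])).getLastD d = c
  | [], b, c, d => by simp
  | x :: l, b, c, d => by
      simpa [List.getLast?_cons_cons] using getLastD_cons_concat l x c d

theorem getLastD_cons_ne {α : Type} (l : List α) (a d : α) (h : l ≠ []) :
    (a :: l).getLastD d = l.getLastD d := by
  cases l with | nil => exact absurd rfl h | cons b u => simp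

theorem dropLast_cons_concat {α : Type} :
    ∀ (l : List α) (b c : α), (b :: (l ++ [c])).dropLast = b :: l
  | [], b, c => rfl
  | x :: l, b, c => by
      simpa [List.dropLast_cons₂] using dropLast_cons_concat l x c

theorem getLastD_cons_cons {α : Type} (a b : α) (l : List α) (d : α) :
    (a :: b :: l).getLastD d = (b :: l).getLastD d := by
  simp [List.getLastD, List.getLast?_cons_cons]

theorem zipE_map3' {β : Type} (f : List Int → β) (mid : List (List Int)) (rl r0 : List Int) :
    (((r0 :: (mid ++ [rl])).zip (mid.zip ((mid ++ [rl]).tail))).map fun x => f x.2.2)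
      = ((mid ++ [rl]).tail).map f := by
  simpa using zipE_map3 f (mid ++ [rl]) r0

theorem zipE_map2' {β : Type} (f : List Int → β) (mid : List (List Int)) (rl r0 : List Int) :
    (((r0 :: (mid ++ [rl])).zip (mid.zip ((mid ++ [rl]).tail))).map fun x => f x.2.1)
      = mid.map f := by
  simpa using zipE_map2 f (mid ++ [rl]) r0

theorem zipE_map1' {β : Type} (f : List Int → β) (mid : List (List Int)) (rl r0 : List Int) :
    (((r0 :: (mid ++ [rl])).zip (mid.zip ((mid ++ [rl]).tail))).map fun x => f x.1)
      = ((r0 :: mid).dropLast).map f := by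
  simpa [dropLast_cons_concat] using zipE_map1 f (mid ++ [rl]) r0

theorem step_comm (mat : List (List Int)) (op : String)
    (hn : 2 ≤ mat.length) (hr : ∀ r ∈ mat, 2 ≤ r.length) :
    solutionStepA mat.length (encL mat, encM mat, encR mat) op
      = (encL (solutionStepB mat op), encM (solutionStepB mat op), encR (solutionStepB mat op)) := by
  obtain ⟨r0, u, rfl⟩ : ∃ a t, mat = a :: t := by
    cases mat with | nil => simp at hn | cons a t => exact ⟨a, t, rfl⟩
  have hu : u ≠ [] := by cases u with | nil => simp at hn | cons b v => simp
  by_cases hop : (op == "ShiftRow") = true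
  · -- ShiftRow
    simp only [solutionStepA, solutionStepB, hop, if_pos]
    refine Prod.ext ?_ (Prod.ext ?_ ?_) <;>
      simp [encL, encM, encR, List.map_dropLast]
    · exact map_getLast' (fun r => r.head?.getD 0) 0 [] u r0
    · exact map_getLast' (fun r => r.tail.dropLast) [] [] u r0
    · exact map_getLast' (fun r => r.getLast?.getD 0) 0 [] u r0
  · -- Rotate
    obtain ⟨mid, rl, rfl⟩ : ∃ mid rl, u = mid ++ [rl] :=
      ⟨u.dropLast, u.getLast hu, (List.dropLast_append_getLast hu).symm⟩
    have h0 : 2 ≤ r0.length := hr r0 (by simp)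
    have hl : 2 ≤ rl.length := hr rl (by simp)
    have hlt : rl.tail ≠ [] := by cases rl with | nil => simp at hl | cons a t => cases t with | nil => simp at hl | cons b v => simp
    have h0d : r0.dropLast ≠ [] := by cases r0 with | nil => simp at h0 | cons a t => cases t with | nil => simp at h0 | cons b v => simp
    refine Prod.ext ?_ (Prod.ext ?_ ?_) <;>
      simp only [solutionStepA, solutionStepB, hop, Bool.false_eq_true, if_false,
        encL, encM, encR, List.map_append, List.map_cons, List.map_nil,
        List.length_cons, List.length_append, List.length_nil, Nat.add_sub_cancel,
        List.set_cons_succ, List.set_cons_zero, List.getD_cons_succ, List.getD_cons_zero,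
        set_map_concat, getD_map_concat, List.tail_cons]
    · -- left column
      simp only [List.cons_append, List.headD_cons, getLastD_cons_cons, getLastD_cons_concat,
        List.map_map, Function.comp_def, List.dropLast_concat]
      rw [row_tail_recon rl hl, zipE_map3' (fun r => r.headD 0),
        headD_append_left _ _ _ hlt]
      have e1 : List.map (fun r => r.headD 0) (mid ++ [rl])
          = List.map (fun r => r.headD 0) mid ++ [rl.headD 0] := by simp
      rw [← e1, map_eq_headD_cons _ [] _ hu]
      simp
    · -- middle rows
      simp only [List.cons_append, List.headD_cons, getLastD_cons_cons, getLastD_cons_concat,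
        List.map_map, Function.comp_def, List.tail_cons, List.dropLast_concat]
      rw [row_hd_dropLast r0 h0, row_tail_recon rl hl, zipE_map2' (fun r => r.tail.dropLast),
        tail_append_singleton _ _ hlt]
      simp
    · -- right column
      simp only [List.cons_append, List.headD_cons, getLastD_cons_cons, getLastD_cons_concat,
        List.map_map, Function.comp_def, List.dropLast_cons₂, List.dropLast_concat,
        dropLast_cons_concat, List.getLastD_concat]
      rw [row_hd_dropLast r0 h0, zipE_map1' (fun r => r.getLastD 0),
        getLastD_cons_ne _ _ _ h0d,
        map_dropLast_concat (fun r => r.getLastD 0) (r0 :: mid) [] (by simp)]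
      simp

theorem mem_getLastD {α : Type} (l : List α) (d : α) (h : l ≠ []) : l.getLastD d ∈ l := by
  cases l with
  | nil => exact absurd rfl h
  | cons a t =>
    have : (a :: t).getLastD d = (a :: t).getLast (by simp) := by
      rw [List.getLastD_eq_getLast?, List.getLast?_eq_some_getLast (by simp)]; rfl
    rw [this]; exact List.getLast_mem _

theorem mem_headD {α : Type} (l : List α) (d : α) (h : l ≠ []) : l.headD d ∈ l := by
  cases l with | nil => exact absurd rfl h | cons a t => simp

theorem stepB_length (mat : List (List Int)) (op : String) (hn : 2 ≤ mat.length) :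
    (solutionStepB mat op).length = mat.length := by
  by_cases hop : (op == "ShiftRow") = true <;>
    simp [solutionStepB, hop, List.length_zip] <;> omega

theorem stepB_rows (mat : List (List Int)) (op : String) (hn : 2 ≤ mat.length)
    (hr : ∀ r ∈ mat, 2 ≤ r.length) : ∀ r ∈ solutionStepB mat op, 2 ≤ r.length := by
  intro r hrm
  by_cases hop : (op == "ShiftRow") = true
  · simp only [solutionStepB, hop, if_pos, List.mem_cons] at hrm
    rcases hrm with rfl | hrm
    · exact hr _ (mem_getLastD _ _ (by intro e; rw [e] at hn; simp at hn))
    · exact hr _ (List.dropLast_subset _ hrm)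
  · have hne : mat ≠ [] := by intro e; rw [e] at hn; simp at hn
    simp only [solutionStepB, hop, Bool.false_eq_true, if_false, List.mem_cons,
      List.mem_append, List.mem_map, List.mem_singleton] at hrm
    rcases hrm with ⟨rfl | ⟨x, _, rfl⟩⟩ | ⟨rfl | h⟩
    · have := hr _ (mem_headD mat [] hne)
      simp only [List.length_cons, List.length_dropLast] <;> omega
    · simp only [List.length_cons, List.length_append, List.length_dropLast,
        List.length_singleton] <;> omega
    · have := hr _ (mem_getLastD mat [] hne)
      simp only [List.length_append, List.length_tail, List.length_singleton] <;> omega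
    · simp at h

theorem foldB_length (ops : List String) : ∀ (mat : List (List Int)), 2 ≤ mat.length →
    (ops.foldl solutionStepB mat).length = mat.length := by
  induction ops with
  | nil => intro mat _; rfl
  | cons op ops ih =>
    intro mat hn
    have h1 := stepB_length mat op hn
    simpa [List.foldl_cons, h1] using ih (solutionStepB mat op) (by omega)

theorem foldB_rows (ops : List String) : ∀ (mat : List (List Int)), 2 ≤ mat.length →
    (∀ r ∈ mat, 2 ≤ r.length) → ∀ r ∈ ops.foldl solutionStepB mat, 2 ≤ r.length := by
  induction ops with
  | nil => intro mat _ hr; exact hr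
  | cons op ops ih =>
    intro mat hn hr
    exact ih (solutionStepB mat op) (by rw [stepB_length mat op hn]; exact hn)
      (stepB_rows mat op hn hr)

theorem fold_comm (ops : List String) : ∀ (mat : List (List Int)), 2 ≤ mat.length →
    (∀ r ∈ mat, 2 ≤ r.length) →
    ops.foldl (solutionStepA mat.length) (encL mat, encM mat, encR mat)
      = (encL (ops.foldl solutionStepB mat), encM (ops.foldl solutionStepB mat),
         encR (ops.foldl solutionStepB mat)) := by
  induction ops with
  | nil => intro mat _ _; rfl
  | cons op ops ih =>
    intro mat hn hr
    have hlen := stepB_length mat op hn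
    have := ih (solutionStepB mat op) (by omega) (stepB_rows mat op hn hr)
    rw [List.foldl_cons, step_comm mat op hn hr, ← hlen]
    exact this

theorem decode : ∀ (mat : List (List Int)), (∀ r ∈ mat, 2 ≤ r.length) →
    (List.range mat.length).map
        (fun i => (encL mat).getD i 0 :: (encM mat).getD i [] ++ [(encR mat).getD i 0]) = mat := by
  intro mat
  induction mat with
  | nil => intro _; rfl
  | cons r mat ih =>
    intro hr
    have h2 := hr r (by simp)
    rw [List.length_cons, List.range_succ_eq_map]
    simp only [List.map_cons, List.map_map, Function.comp_def, encL, encM, encR,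
      List.getD_cons_zero, List.getD_cons_succ]
    rw [row_hd_dropLast r h2, dropLast_concat_getLastD r 0 (by intro e; rw [e] at h2; simp at h2)]
    exact congrArg _ (ih (fun x hx => hr x (by simp [hx])))

theorem slice_one_neg_one (row : List Int) :
    PySem.List.slice row (some 1) (some (-1)) = row.tail.dropLast := by
  cases row with
  | nil => rfl
  | cons a t => simp [PySem.List.slice, List.dropLast_eq_take]

theorem getD_length_sub_one : ∀ (l : List Int) (d : Int), l.getD (l.length - 1) d = l.getLastD d
  | [], d => rfl
  | x :: l, d => by
    cases l with
    | nil => rfl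
    | cons y t => simpa using getD_length_sub_one (y :: t) d

theorem solution_eq_alt (rc : List (List Int)) (operations : List String)
    (hpre : Pre_solution rc operations) :
    solution rc operations = solution_alt rc operations := by
  obtain ⟨hn, hm, hrect⟩ := hpre
  have hr : ∀ r ∈ rc, 2 ≤ r.length := fun r hrr => (hrect r hrr) ▸ hm
  have hid : rc.map (fun row => row.map id) = rc := by simp
  rw [solution_alt, hid]
  show (let n := rc.length
    let rows := rc.map (fun row => PySem.List.slice row (some 1) (some (-1)))
    let left := rc.map (fun row => row.headD 0)
    let right := rc.map (fun row => row.getD ((rc.headD []).length - 1) 0)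
    let st := operations.foldl (solutionStepA n) (left, rows, right)
    (List.range n).map (fun i => st.1.getD i 0 :: st.2.1.getD i [] ++ [st.2.2.getD i 0]))
      = operations.foldl solutionStepB rc
  have e1 : rc.map (fun row => PySem.List.slice row (some 1) (some (-1))) = encM rc := by
    simp only [encM, slice_one_neg_one]
  have e2 : rc.map (fun row => row.getD ((rc.headD []).length - 1) 0) = encR rc := by
    apply List.map_congr_left
    intro r hrr
    rw [← hrect r hrr]
    exact getD_length_sub_one r 0
  have e3 : rc.map (fun row => row.headD 0) = encL rc := rfl
  simp only [e1, e2, e3]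
  rw [fold_comm operations rc hn hr]
  have hlen := foldB_length operations rc hn
  rw [← hlen]
  exact decode _ (foldB_rows operations rc hn hr)

-- ===== VERDICT (by name: the statement is the Claim_ definition above) =====
theorem solution_spec : Claim_equal_solution := by
  intro rc operations _ hpre
  unfold Spec_solution
  exact solution_eq_alt rc operations hpre
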